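-- pv_equiv track=rewrite | github.com/GuillaumeGandon/advent-of-code | advent-of-code-2016/day_07/day_07.py | parse_ip
-- ===== SOURCE A (Python) =====
-- def parse_ip(ip):
--     outside_square_bracket = []
--     within_square_bracket = []
--     tmp = ""
--     for c in ip:
--         if c == "[":
--             outside_square_bracket.append(tmp)
--             tmp = ""
--         elif c == "]":
--             within_square_bracket.append(tmp)
--             tmp = ""
--         else:
--             tmp += c
--     outside_square_bracket.append(tmp)
--     return outside_square_bracket, within_square_bracket
-- ===== SOURCE B (Python) =====
-- def parse_ip(ip):
--     # reverse scan: when a bracket is met, the segment just collected is the one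
--     # that FOLLOWS it in the string, and its classifying delimiter (the one to its
--     # right) is already known, so it is flushed straight into the right list.
--     # Lists and segment chars are gathered backwards and reversed once at the end.
--     outside_square_bracket = []
--     within_square_bracket = []
--     target = outside_square_bracket
--     seg = []
--     for c in reversed(ip):
--         if c == "[":
--             target.append("".join(reversed(seg)))
--             seg = []
--             target = outside_square_bracket
--         elif c == "]":
--             target.append("".join(reversed(seg)))
--             seg = []
--             target = within_square_bracket
--         else:
--             seg.append(c)
--     target.append("".join(reversed(seg)))
--     return outside_square_bracket[::-1], within_square_bracket[::-1]
-- ===== Notes on version B (the rewrite author's own statement) =====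
-- stated objective: alternative
-- what changed: Replaces A's forward scan with a pending tmp buffer flushed at each delimiter by a reverse scan in which each segment's classifying delimiter has already been seen, so segments are flushed straight into the correct list (built backwards and reversed once at the end).
import Mathlib
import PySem

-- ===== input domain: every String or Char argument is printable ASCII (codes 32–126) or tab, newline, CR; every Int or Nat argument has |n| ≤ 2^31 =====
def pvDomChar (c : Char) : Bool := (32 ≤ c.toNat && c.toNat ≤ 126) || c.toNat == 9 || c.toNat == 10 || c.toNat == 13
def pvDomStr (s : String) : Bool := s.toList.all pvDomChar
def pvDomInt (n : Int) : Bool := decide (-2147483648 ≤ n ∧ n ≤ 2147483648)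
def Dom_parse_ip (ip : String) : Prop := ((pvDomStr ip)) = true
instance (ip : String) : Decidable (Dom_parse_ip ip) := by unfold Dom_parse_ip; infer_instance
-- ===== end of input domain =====

-- B replaces A's forward scan + pending tmp buffer by a reverse scan that flushes each
-- segment straight into the list chosen by its already-seen right delimiter (objective: alternative).

-- ===== PORT A =====
-- A's loop: state (outside, within, tmp); tmp flushed to outside on '[', to within on ']'.
-- Segments are kept as List Char and wrapped with String.ofList at the end (exact bridge).
def stepA (s : List (List Char) × List (List Char) × List Char) (c : Char) :
    List (List Char) × List (List Char) × List Char :=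
  if c = '[' then (s.1 ++ [s.2.2], s.2.1, [])
  else if c = ']' then (s.1, s.2.1 ++ [s.2.2], [])
  else (s.1, s.2.1, s.2.2 ++ [c])

def parse_ip (ip : String) : List String × List String :=
  let r := ip.toList.foldl stepA ([], [], [])
  ((r.1 ++ [r.2.2]).map String.ofList, r.2.1.map String.ofList)

-- ===== PORT B =====
-- B's loop over reversed(ip) = foldr; state (outside, within, targetIsWithin, seg).
-- seg collects the current segment's chars backwards ('.append' = ++ [c], joined reversed);
-- on a bracket the segment is flushed to the current target, then the target is re-chosen;
-- both lists are built backwards and reversed once at the end ('[::-1]' = .reverse).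
def stepB2 (c : Char) (s : List (List Char) × List (List Char) × Bool × List Char) :
    List (List Char) × List (List Char) × Bool × List Char :=
  if c = '[' then
    (if s.2.2.1 then (s.1, s.2.1 ++ [s.2.2.2.reverse], false, [])
     else (s.1 ++ [s.2.2.2.reverse], s.2.1, false, []))
  else if c = ']' then
    (if s.2.2.1 then (s.1, s.2.1 ++ [s.2.2.2.reverse], true, [])
     else (s.1 ++ [s.2.2.2.reverse], s.2.1, true, []))
  else (s.1, s.2.1, s.2.2.1, s.2.2.2 ++ [c])

def goB2 (cs : List Char) : List (List Char) × List (List Char) × Bool × List Char :=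
  cs.foldr stepB2 ([], [], false, [])

def parse_ip_alt (ip : String) : List String × List String :=
  let r := goB2 ip.toList
  let fin := if r.2.2.1 then (r.1, r.2.1 ++ [r.2.2.2.reverse])
             else (r.1 ++ [r.2.2.2.reverse], r.2.1)
  (fin.1.reverse.map String.ofList, fin.2.reverse.map String.ofList)

-- ===== PRECONDITION & SPEC =====
def Spec_parse_ip (ip : String) (out : List String × List String) : Prop := out = parse_ip_alt ip
instance (ip : String) (out : List String × List String) : Decidable (Spec_parse_ip ip out) := by unfold Spec_parse_ip; infer_instance

-- ===== CLAIM (what is proved, stated in full; the proofs are below) =====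
def Claim_equal_parse_ip : Prop := ∀ (ip : String), Dom_parse_ip ip → Spec_parse_ip ip (parse_ip ip)

-- ===== LEMMAS AND PROOFS =====

-- proof-only intermediate form of B: same reverse scan, but segments are prepended
-- in place at the head of the (front-to-back) target list
def prependHead (c : Char) : List (List Char) → List (List Char)
  | [] => []          -- unreachable: the target list is always nonempty
  | h :: t => (c :: h) :: t

def stepB (c : Char) (s : List (List Char) × List (List Char) × Bool) :
    List (List Char) × List (List Char) × Bool :=
  if c = '[' then ([] :: s.1, s.2.1, false)
  else if c = ']' then (s.1, [] :: s.2.1, true)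
  else if s.2.2 then (s.1, prependHead c s.2.1, true)
  else (prependHead c s.1, s.2.1, false)

def goB (cs : List Char) : List (List Char) × List (List Char) × Bool :=
  cs.foldr stepB ([[]], [], false)

theorem goB_cons (c : Char) (cs : List Char) : goB (c :: cs) = stepB c (goB cs) := rfl

theorem prependHead_ne_nil (c : Char) (l : List (List Char)) (h : l ≠ []) :
    prependHead c l ≠ [] := by
  cases l with
  | nil => exact absurd rfl h
  | cons a t => simp [prependHead]

-- invariant: the outside list is never empty, and the within list is nonempty when targeted
theorem goB_inv (cs : List Char) :
    (goB cs).1 ≠ [] ∧ ((goB cs).2.2 = true → (goB cs).2.1 ≠ []) := by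
  induction cs with
  | nil => simp [goB]
  | cons c cs ih =>
    rw [goB_cons]
    unfold stepB
    split_ifs with h1 h2 h3
    · simpa using ih.2
    · simp [ih.1]
    · exact ⟨ih.1, fun _ => prependHead_ne_nil c _ (ih.2 h3)⟩
    · exact ⟨prependHead_ne_nil c _ ih.1, by simp⟩

-- B's flush-and-reverse fold computes the intermediate form, read front to back
theorem goB_eq_goB2 (cs : List Char) :
    goB cs =
      (if (goB2 cs).2.2.1 then
        ((goB2 cs).1.reverse, (goB2 cs).2.2.2.reverse :: (goB2 cs).2.1.reverse, true)
      else ((goB2 cs).2.2.2.reverse :: (goB2 cs).1.reverse, (goB2 cs).2.1.reverse, false)) := by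
  induction cs with
  | nil => simp [goB, goB2]
  | cons c cs ih =>
    rw [goB_cons, show goB2 (c :: cs) = stepB2 c (goB2 cs) from rfl]
    by_cases hf : (goB2 cs).2.2.1 = true
    · rw [ih]
      by_cases hc1 : c = '['
      · simp [stepB, stepB2, hc1, hf]
      · by_cases hc2 : c = ']'
        · simp [stepB, stepB2, hc1, hc2, hf]
        · simp [stepB, stepB2, hc1, hc2, hf, prependHead]
    · rw [ih]
      by_cases hc1 : c = '['
      · simp [stepB, stepB2, hc1, hf]
      · by_cases hc2 : c = ']'
        · simp [stepB, stepB2, hc1, hc2, hf]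
        · simp [stepB, stepB2, hc1, hc2, hf, prependHead]

-- hence B's port equals the intermediate form's output
theorem alt_eq (ip : String) :
    parse_ip_alt ip =
      ((goB ip.toList).1.map String.ofList, (goB ip.toList).2.1.map String.ofList) := by
  unfold parse_ip_alt
  rw [goB_eq_goB2 ip.toList]
  by_cases hf : (goB2 ip.toList).2.2.1 = true
  · simp [hf]
  · simp [hf]

-- main loop correspondence: A's foldl from any state vs the intermediate foldr form
theorem loop_corr (cs : List Char) (o w : List (List Char)) (t : List Char) :
    ((List.foldl stepA (o, w, t) cs).1 ++ [(List.foldl stepA (o, w, t) cs).2.2],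
      (List.foldl stepA (o, w, t) cs).2.1) =
    (if (goB cs).2.2 = true then
        (o ++ (goB cs).1, w ++ (t ++ (goB cs).2.1.headI) :: (goB cs).2.1.tail)
      else (o ++ (t ++ (goB cs).1.headI) :: (goB cs).1.tail, w ++ (goB cs).2.1)) := by
  induction cs generalizing o w t with
  | nil => simp [goB]
  | cons c cs ih =>
    have hinv := goB_inv cs
    rcases ho : (goB cs).1 with _ | ⟨o1, os⟩
    · exact absurd ho hinv.1
    rw [goB_cons]
    by_cases hc1 : c = '['
    · have hA : stepA (o, w, t) c = (o ++ [t], w, []) := by simp [stepA, hc1]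
      have hB : stepB c (goB cs) = ([] :: (goB cs).1, (goB cs).2.1, false) := by
        simp [stepB, hc1]
      rw [List.foldl_cons, hA, hB, ih]
      by_cases hf : (goB cs).2.2 = true
      · rcases hw : (goB cs).2.1 with _ | ⟨w1, ws⟩
        · exact absurd hw (hinv.2 hf)
        · simp [hf, ho]
      · simp [hf, ho]
    · by_cases hc2 : c = ']'
      · have hA : stepA (o, w, t) c = (o, w ++ [t], []) := by simp [stepA, hc2]
        have hB : stepB c (goB cs) = ((goB cs).1, [] :: (goB cs).2.1, true) := by
          simp [stepB, hc1, hc2]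
        rw [List.foldl_cons, hA, hB, ih]
        by_cases hf : (goB cs).2.2 = true
        · rcases hw : (goB cs).2.1 with _ | ⟨w1, ws⟩
          · exact absurd hw (hinv.2 hf)
          · simp [hf]
        · simp [hf, ho]
      · have hA : stepA (o, w, t) c = (o, w, t ++ [c]) := by simp [stepA, hc1, hc2]
        rw [List.foldl_cons, hA, ih]
        by_cases hf : (goB cs).2.2 = true
        · have hB : stepB c (goB cs) = ((goB cs).1, prependHead c (goB cs).2.1, true) := by
            simp [stepB, hc1, hc2, hf]
          rcases hw : (goB cs).2.1 with _ | ⟨w1, ws⟩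
          · exact absurd hw (hinv.2 hf)
          · rw [hB]
            simp [hf, hw, prependHead]
        · have hB : stepB c (goB cs) = (prependHead c (goB cs).1, (goB cs).2.1, false) := by
            simp [stepB, hc1, hc2, hf]
          rw [hB]
          simp [hf, ho, prependHead]

-- ===== VERDICT (by name: the statement is the Claim_ definition above) =====
theorem parse_ip_spec : Claim_equal_parse_ip := by
  intro ip _
  unfold Spec_parse_ip parse_ip
  rw [alt_eq]
  have h := loop_corr ip.toList [] [] []
  have hinv := goB_inv ip.toList
  rw [Prod.mk.injEq] at h
  split_ifs at h with hf
  · rcases hw : (goB ip.toList).2.1 with _ | ⟨w1, ws⟩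
    · exact absurd hw (hinv.2 hf)
    · simp only [hw, List.nil_append, List.headI, List.tail_cons] at h
      simp only [h.1, h.2, hw]
  · rcases ho : (goB ip.toList).1 with _ | ⟨o1, os⟩
    · exact absurd ho hinv.1
    · simp only [ho, List.nil_append, List.headI, List.tail_cons] at h
      simp only [h.1, h.2, ho]
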